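-- pv_equiv track=rewrite | github.com/CartographerLabs/Tribal | Tribal/utils/easy_llm.py | get_message_roles
-- ===== SOURCE A (Python) =====
-- from typing import Any, Dict, List, Tuple, Type, Union
--
-- def get_message_roles(roles: List[str]) -> Dict[str, str]:
--     if not roles:
--         return {'user': 'user', 'assistant': 'assistant'}
--
--     user_role = assistant_role = None
--
--     for role in roles:
--         role_lower = role.lower()
--         if 'user' in role_lower and not user_role:
--             user_role = role
--         elif 'assistant' in role_lower and not assistant_role:
--             assistant_role = role
--         elif 'system' in role_lower and not assistant_role:
--             assistant_role = role
--
--     user_role = user_role or 'user'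
--     assistant_role = assistant_role or 'assistant'
--
--     return {'user': user_role, 'assistant': assistant_role}
-- ===== SOURCE B (Python) =====
-- def get_message_roles(roles):
--     user_role = next((r for r in roles if 'user' in r.lower()), None)
--     if user_role is None:
--         rest = roles
--     else:
--         rest = _drop_first(roles, user_role)
--     assistant_role = next(
--         (r for r in rest if 'assistant' in r.lower() or 'system' in r.lower()),
--         'assistant')
--     return {'user': user_role if user_role is not None else 'user',
--             'assistant': assistant_role}
--
--
-- def _drop_first(xs, x):
--     out = []
--     it = iter(xs)
--     for y in it:
--         if y == x:
--             break
--         out.append(y)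
--     out.extend(it)
--     return out
-- ===== Notes on version B (the rewrite author's own statement) =====
-- stated objective: alternative
-- what changed: Replaces A's single interleaved loop with two mutable slots by two independent first-match scans: find the first 'user' role, drop that element, then find the first 'assistant'/'system' role in the remainder.
import Mathlib
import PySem

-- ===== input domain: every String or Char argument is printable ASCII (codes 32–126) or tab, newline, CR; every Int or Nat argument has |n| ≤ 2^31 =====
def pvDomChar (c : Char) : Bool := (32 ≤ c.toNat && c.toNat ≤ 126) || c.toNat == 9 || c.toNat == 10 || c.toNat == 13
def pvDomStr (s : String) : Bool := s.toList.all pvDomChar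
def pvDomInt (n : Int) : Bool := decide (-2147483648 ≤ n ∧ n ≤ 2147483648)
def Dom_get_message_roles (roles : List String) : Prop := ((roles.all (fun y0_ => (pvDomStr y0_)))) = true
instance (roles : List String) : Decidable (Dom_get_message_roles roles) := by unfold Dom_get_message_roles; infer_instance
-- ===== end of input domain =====

-- B replaces A's single interleaved loop with two mutable slots by two independent
-- first-match scans (find the user role, drop it, find the assistant/system role); alternative decomposition, same cost.

-- 'user' in role.lower()
def pvHasU (r : String) : Bool := PySem.Str.isIn "user" (PySem.Str.lower r)
-- 'assistant' in role.lower()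
def pvHasAs (r : String) : Bool := PySem.Str.isIn "assistant" (PySem.Str.lower r)
-- 'system' in role.lower()
def pvHasSy (r : String) : Bool := PySem.Str.isIn "system" (PySem.Str.lower r)
-- Python truthiness of an Optional[str]
def pvFalsy (o : Option String) : Bool := match o with | none => true | some s => s == ""

-- ===== PORT A =====
-- the for-loop over roles with its two mutable slots (if / elif / elif in A's order)
def pvALoop : List String → Option String → Option String → Option String × Option String
  | [], u, a => (u, a)
  | r :: rs, u, a =>
    if pvHasU r && pvFalsy u then pvALoop rs (some r) a
    else if pvHasAs r && pvFalsy a then pvALoop rs u (some r)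
    else if pvHasSy r && pvFalsy a then pvALoop rs u (some r)
    else pvALoop rs u a

-- user_role = user_role or 'user'; assistant_role = assistant_role or 'assistant'; the returned dict
def pvAFinal (p : Option String × Option String) : List (String × String) :=
  [("user", if pvFalsy p.1 then "user" else p.1.getD ""),
   ("assistant", if pvFalsy p.2 then "assistant" else p.2.getD "")]

def get_message_roles (roles : List String) : List (String × String) :=
  if roles = [] then [("user", "user"), ("assistant", "assistant")]
  else pvAFinal (pvALoop roles none none)

-- ===== PORT B =====
def pvHasA (r : String) : Bool := pvHasAs r || pvHasSy r

def pvDropFirst : List String → String → List String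
  | [], _ => []
  | y :: ys, x => if y = x then ys else y :: pvDropFirst ys x

def get_message_roles_alt (roles : List String) : List (String × String) :=
  let userRole := roles.find? pvHasU
  let rest := match userRole with
    | none => roles
    | some u => pvDropFirst roles u
  let assistantRole := (rest.find? pvHasA).getD "assistant"
  [("user", userRole.getD "user"), ("assistant", assistantRole)]

-- ===== PRECONDITION & SPEC =====
def Spec_get_message_roles (roles : List String) (out : List (String × String)) : Prop := out = get_message_roles_alt roles
instance (roles : List String) (out : List (String × String)) : Decidable (Spec_get_message_roles roles out) := by unfold Spec_get_message_roles; infer_instance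

-- ===== CLAIM (what is proved, stated in full; the proofs are below) =====
def Claim_equal_get_message_roles : Prop := ∀ (roles : List String), Dom_get_message_roles roles → Spec_get_message_roles roles (get_message_roles roles)

-- ===== LEMMAS AND PROOFS =====

theorem pvFalsy_none : pvFalsy none = true := rfl

theorem pvFalsy_some_ne {x : String} (h : x ≠ "") : pvFalsy (some x) = false := by
  simp [pvFalsy, h]

theorem pvHasU_ne_empty {r : String} (h : pvHasU r = true) : r ≠ "" := by
  intro he; subst he; exact absurd h (by decide)

theorem pvHasA_ne_empty {r : String} (h : pvHasA r = true) : r ≠ "" := by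
  intro he; subst he; exact absurd h (by decide)

-- both slots truthy → the loop changes nothing
theorem pvALoop_full (rs : List String) (x y : String) (hx : x ≠ "") (hy : y ≠ "") :
    pvALoop rs (some x) (some y) = (some x, some y) := by
  induction rs with
  | nil => rfl
  | cons r rs ih =>
    simp only [pvALoop, pvFalsy_some_ne hx, pvFalsy_some_ne hy, Bool.and_false,
      Bool.false_eq_true, if_false, ih]

-- user slot truthy, assistant empty → assistant becomes the first assistant/system role
theorem pvALoop_user (rs : List String) (x : String) (hx : x ≠ "") :
    pvALoop rs (some x) none = (some x, rs.find? pvHasA) := by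
  induction rs with
  | nil => rfl
  | cons r rs ih =>
    simp only [pvALoop, pvFalsy_some_ne hx, pvFalsy_none, Bool.and_false, Bool.and_true,
      Bool.false_eq_true, if_false, List.find?]
    by_cases ha : pvHasAs r = true
    · have hA : pvHasA r = true := by simp [pvHasA, ha]
      simp [ha, hA, pvALoop_full rs x r hx (pvHasA_ne_empty hA)]
    · by_cases hs : pvHasSy r = true
      · have hA : pvHasA r = true := by simp [pvHasA, hs]
        simp [ha, hs, hA, pvALoop_full rs x r hx (pvHasA_ne_empty hA)]
      · have hA : pvHasA r = false := by simp [pvHasA]; exact ⟨by simpa using ha, by simpa using hs⟩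
        simp [ha, hs, hA, ih]

-- assistant slot truthy, user empty → user becomes the first 'user' role
theorem pvALoop_asst (rs : List String) (y : String) (hy : y ≠ "") :
    pvALoop rs none (some y) = (rs.find? pvHasU, some y) := by
  induction rs with
  | nil => rfl
  | cons r rs ih =>
    simp only [pvALoop, pvFalsy_some_ne hy, pvFalsy_none, Bool.and_false, Bool.and_true,
      Bool.false_eq_true, if_false, List.find?]
    by_cases hu : pvHasU r = true
    · simp [hu, pvALoop_full rs r y (pvHasU_ne_empty hu) hy]
    · simp [hu, ih]

theorem pvDropFirst_cons_ne (r x : String) (rs : List String) (h : r ≠ x) :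
    pvDropFirst (r :: rs) x = r :: pvDropFirst rs x := by
  simp [pvDropFirst, h]

-- A with the empty-list guard folded into pvAFinal
theorem pvA_unguarded (roles : List String) :
    get_message_roles roles = pvAFinal (pvALoop roles none none) := by
  cases roles with
  | nil => rfl
  | cons r rs => simp [get_message_roles]

-- main equivalence
theorem pv_main (roles : List String) : get_message_roles roles = get_message_roles_alt roles := by
  induction roles with
  | nil => rfl
  | cons r rs ih =>
    rw [pvA_unguarded]
    by_cases hu : pvHasU r = true
    · -- head becomes the user role; B drops it and scans the tail for assistant
      have hrne := pvHasU_ne_empty hu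
      have hloop : pvALoop (r :: rs) none none = (some r, rs.find? pvHasA) := by
        simp only [pvALoop, pvFalsy_none, Bool.and_true, hu]
        exact pvALoop_user rs r hrne
      have hfind : (r :: rs).find? pvHasU = some r := by simp [List.find?, hu]
      have hdrop : pvDropFirst (r :: rs) r = rs := by simp [pvDropFirst]
      rw [hloop]
      simp only [get_message_roles_alt, hfind, hdrop]
      cases hfa : rs.find? pvHasA with
      | none => simp [pvAFinal, pvFalsy_some_ne hrne, pvFalsy_none]
      | some a =>
        have hane := pvHasA_ne_empty (List.find?_some hfa)
        simp [pvAFinal, pvFalsy_some_ne hrne, pvFalsy_some_ne hane]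
    · by_cases ha : pvHasA r = true
      · -- head becomes the assistant role; B finds the user in the tail, head survives the drop
        have hrne := pvHasA_ne_empty ha
        have hloop : pvALoop (r :: rs) none none = (rs.find? pvHasU, some r) := by
          simp only [pvALoop, pvFalsy_none, Bool.and_true, hu, Bool.false_eq_true, if_false]
          by_cases h1 : pvHasAs r = true
          · simp [h1, pvALoop_asst rs r hrne]
          · have h2 : pvHasSy r = true := by
              have ha' := ha
              simp [pvHasA, h1] at ha'
              exact ha'
            simp [h1, h2, pvALoop_asst rs r hrne]
        have hfindA : (r :: rs).find? pvHasA = some r := by simp [List.find?, ha]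
        rw [hloop]
        simp only [get_message_roles_alt, List.find?, hu]
        cases hfu : rs.find? pvHasU with
        | none => simp [pvAFinal, pvFalsy_none, pvFalsy_some_ne hrne, List.find?, ha]
        | some u =>
          have hune := pvHasU_ne_empty (List.find?_some hfu)
          have hru : r ≠ u := by
            intro he; subst he; exact absurd (List.find?_some hfu) (by simp [hu])
          simp [pvAFinal, pvFalsy_some_ne hrne, pvFalsy_some_ne hune,
            pvDropFirst_cons_ne r u rs hru, ha]
      · -- head is irrelevant to both slots: both programs reduce to the tail
        have h1 : pvHasAs r = false := by
          cases h : pvHasAs r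
          · rfl
          · exact absurd (by simp [pvHasA, h]) ha
        have h2 : pvHasSy r = false := by
          cases h : pvHasSy r
          · rfl
          · exact absurd (by simp [pvHasA, h]) ha
        have hloop : pvALoop (r :: rs) none none = pvALoop rs none none := by
          simp [pvALoop, hu, h1, h2]
        have haF : pvHasA r = false := by simp [pvHasA, h1, h2]
        have hBred : get_message_roles_alt (r :: rs) = get_message_roles_alt rs := by
          simp only [get_message_roles_alt, List.find?, hu]
          cases hfu : rs.find? pvHasU with
          | none => simp [List.find?, haF]
          | some u =>
            have hru : r ≠ u := by
              intro he; subst he; exact absurd (List.find?_some hfu) (by simp [hu])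
            simp [pvDropFirst_cons_ne r u rs hru, haF]
        rw [hloop, hBred, ← pvA_unguarded, ih]

-- ===== VERDICT (by name: the statement is the Claim_ definition above) =====
theorem get_message_roles_spec : Claim_equal_get_message_roles := by
  intro roles _
  exact pv_main roles
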